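-- pv_equiv track=rewrite | github.com/MrBrantCode/unitest_baseline | mut_generate/mist_train_cf/cf_35781/solution.py | sort_logs
-- ===== SOURCE A (Python) =====
-- from typing import List
--
-- def sort_logs(in_log: List[str]) -> List[str]:
--     letter_logs = []
--     digit_logs = []
--
--     for log in in_log:
--         identifier, content = log.split(' ', 1)
--         if content[0].isalpha():
--             letter_logs.append((identifier, content))
--         else:
--             digit_logs.append(log)
--
--     letter_logs.sort(key=lambda x: (x[1], x[0]))
--
--     return [f"{identifier} {content}" for identifier, content in letter_logs] + digit_logs
-- ===== SOURCE B (Python) =====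
-- def sort_logs(in_log):
--     def key(log):
--         identifier, content = log.split(' ', 1)
--         if content[0].isalpha():
--             return (0, content, identifier)
--         return (1, '', '')
--     return sorted(in_log, key=key)
-- ===== Notes on version B (the rewrite author's own statement) =====
-- stated objective: idiomatic
-- what changed: B replaces A's partition into letter/digit lists, separate sort of the letter pairs and string rebuilding with a single stable sorted() call on the original log strings under a (tag, content, identifier) key, relying on sort stability to keep digit logs in input order.
import Mathlib
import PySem

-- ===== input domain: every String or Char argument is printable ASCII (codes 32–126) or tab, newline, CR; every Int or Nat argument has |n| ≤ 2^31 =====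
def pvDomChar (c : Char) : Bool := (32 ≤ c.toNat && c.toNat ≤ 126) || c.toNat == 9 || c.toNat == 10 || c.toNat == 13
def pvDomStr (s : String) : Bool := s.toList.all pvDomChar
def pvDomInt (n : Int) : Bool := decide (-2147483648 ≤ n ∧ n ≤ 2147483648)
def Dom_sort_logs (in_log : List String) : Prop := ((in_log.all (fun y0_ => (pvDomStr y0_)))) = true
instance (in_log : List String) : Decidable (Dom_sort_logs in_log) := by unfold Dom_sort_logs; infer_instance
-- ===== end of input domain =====

-- B replaces A's partition + per-part sort + string rebuilding with a single stable
-- sorted() call on the original strings under a (tag, content, identifier) key (objective: idiomatic).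

-- ===== PORT A =====
-- body of A's for-loop; state = (letter_logs, digit_logs)
def stepA (st : List (String × String) × List String) (log : String) :
    List (String × String) × List String :=
  match PySem.Str.splitMax? log " " 1 with
  | some [identifier, content] =>
      match PySem.List.pyGet? content.toList 0 with
      | some c =>
          if PySem.Chars.isalpha c then (st.1 ++ [(identifier, content)], st.2)
          else (st.1, st.2 ++ [log])
      | none => st   -- Python raises IndexError here; excluded by Pre_
  | _ => st          -- Python raises ValueError here; excluded by Pre_

def sort_logs (in_log : List String) : List String :=
  let st := in_log.foldl stepA ([], [])
  (PySem.List.sorted2 st.1 (fun x => x.2) (fun x => x.1)).map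
      (fun x => PySem.Str.join " " [x.1, x.2]) ++ st.2

-- ===== PORT B =====
-- Source B's key(log); Python's str comparison is '<' on toList (code-point lexicographic)
def keyB (log : String) : Nat × List Char × List Char :=
  match PySem.Str.splitMax? log " " 1 with
  | some [identifier, content] =>
      match PySem.List.pyGet? content.toList 0 with
      | some c =>
          if PySem.Chars.isalpha c then (0, content.toList, identifier.toList)
          else (1, [], [])
      | none => (1, [], [])   -- Python raises IndexError here; excluded by Pre_
  | _ => (1, [], [])          -- Python raises ValueError here; excluded by Pre_

-- Python's 3-tuple comparison: lexicographic on the components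
def keyLt (a b : Nat × List Char × List Char) : Prop :=
  a.1 < b.1 ∨ (a.1 = b.1 ∧ (a.2.1 < b.2.1 ∨ (a.2.1 = b.2.1 ∧ a.2.2 < b.2.2)))
@[reducible] def keyLTi : LT (Nat × List Char × List Char) := ⟨keyLt⟩
def keyDec (a b : Nat × List Char × List Char) : Decidable (keyLt a b) := by
  unfold keyLt; infer_instance

def sort_logs_alt (in_log : List String) : List String :=
  @PySem.List.sorted String _ keyLTi (fun a b => keyDec a b) in_log keyB false

-- ===== PRECONDITION & SPEC =====
-- Pre_ excludes exactly the inputs on which A (and B) raises: a log with no space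
-- (ValueError from the 2-way unpacking) or with nothing after the first space
-- (IndexError from content[0]).
def Pre_sort_logs (in_log : List String) : Prop :=
  ∀ log ∈ in_log, 2 ≤ (log.toList.dropWhile (· != ' ')).length
instance (in_log : List String) : Decidable (Pre_sort_logs in_log) := by
  unfold Pre_sort_logs; infer_instance

def pvWitness_sort_logs : List String := ["a1 act zoo", "d1 8 9", "a2 act car"]

def Spec_sort_logs (in_log : List String) (out : List String) : Prop := out = sort_logs_alt in_log
instance (in_log : List String) (out : List String) : Decidable (Spec_sort_logs in_log out) := by
  unfold Spec_sort_logs; infer_instance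

-- ===== CLAIM (what is proved, stated in full; the proofs are below) =====
def Claim_equal_sort_logs : Prop := ∀ (in_log : List String), Dom_sort_logs in_log → Pre_sort_logs in_log → Spec_sort_logs in_log (sort_logs in_log)

-- ===== LEMMAS AND PROOFS =====

-- fuel-0 shape of CPython-split's worker
theorem gZ (sep : List Char) (fuel : Nat) (l cur : List Char) (acc : List (List Char)) :
    PySem.Chars.splitOnMax.go sep fuel 0 l cur acc = ((cur.reverse ++ l) :: acc).reverse := by
  cases fuel <;> cases l <;> simp [PySem.Chars.splitOnMax.go]

-- maxsplit-1 shape of the worker for sep = " "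
theorem gOne (l : List Char) : ∀ (fuel : Nat) (cur : List Char) (acc : List (List Char)),
    l.length < fuel → ' ' ∈ l →
    PySem.Chars.splitOnMax.go [' '] fuel 1 l cur acc =
      ((l.dropWhile (· != ' ')).tail :: (cur.reverse ++ l.takeWhile (· != ' ')) :: acc).reverse := by
  induction l with
  | nil => intro fuel cur acc hf hm; simp at hm
  | cons c rest ih =>
    intro fuel cur acc hf hm
    cases fuel with
    | zero => omega
    | succ f =>
      by_cases hc : c = ' '
      · subst hc
        simp [PySem.Chars.splitOnMax.go, List.isPrefixOf, gZ]
      · have hm' : ' ' ∈ rest := by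
          rcases List.mem_cons.mp hm with h | h
          · exact absurd h.symm hc
          · exact h
        have hpre : List.isPrefixOf [' '] (c :: rest) = false := by
          simp only [List.isPrefixOf, Bool.and_eq_false_iff]
          left
          simpa using fun h => hc h.symm
        simp only [PySem.Chars.splitOnMax.go, hpre]
        rw [ih f (c :: cur) acc (by simpa using hf) hm']
        simp [hc]

-- log.split(' ', 1) closed form when the log contains a space
theorem splitStr (log : String) (h : ' ' ∈ log.toList) :
    PySem.Str.splitMax? log " " 1 =
      some [String.ofList (log.toList.takeWhile (· != ' ')),
            String.ofList ((log.toList.dropWhile (· != ' ')).tail)] := by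
  have h1 : (" " : String).toList = [' '] := by decide
  have h2 : PySem.Chars.splitOnMax log.toList [' '] 1 =
      [log.toList.takeWhile (· != ' '), (log.toList.dropWhile (· != ' ')).tail] := by
    unfold PySem.Chars.splitOnMax
    rw [if_neg (by omega)]
    norm_num
    rw [gOne _ _ _ _ (by simp) h]
    simp
  simp [PySem.Str.splitMax?, PySem.Chars.splitMax?, h1, h2]

theorem drop_shape (l : List Char) (h2 : 2 ≤ (l.dropWhile (· != ' ')).length) :
    l.dropWhile (· != ' ') = ' ' :: (l.dropWhile (· != ' ')).tail ∧
    (l.dropWhile (· != ' ')).tail ≠ [] ∧ ' ' ∈ l := by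
  rcases hd : l.dropWhile (· != ' ') with _ | ⟨a, t⟩
  · simp [hd] at h2
  · have ha : (a != ' ') = false := by
      have := List.head_dropWhile_not (p := (· != ' ')) (l := l) (by simp [hd])
      simpa [hd] using this
    have ha' : a = ' ' := by simpa using ha
    subst ha'
    refine ⟨by simp, ?_, ?_⟩
    · rw [hd] at h2
      intro hnil
      simp only [List.tail_cons] at hnil
      rw [hnil] at h2
      simp at h2
    · have : ' ' ∈ l.dropWhile (· != ' ') := by rw [hd]; simp
      exact (List.dropWhile_sublist _).subset this

-- identifier + " " + content rebuilds the original log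
theorem rebuild_round (log : String) (h2 : 2 ≤ (log.toList.dropWhile (· != ' ')).length) :
    PySem.Str.join " " [String.ofList (log.toList.takeWhile (· != ' ')),
        String.ofList ((log.toList.dropWhile (· != ' ')).tail)] = log := by
  obtain ⟨hd, hne, hm⟩ := drop_shape log.toList h2
  have hlist : (PySem.Str.join " " [String.ofList (log.toList.takeWhile (· != ' ')),
      String.ofList ((log.toList.dropWhile (· != ' ')).tail)]).toList = log.toList := by
    rw [PySem.Str.toList_join]
    simp only [List.map_cons, List.map_nil, String.toList_ofList]
    rw [show (" " : String).toList = [' '] from by decide]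
    rw [PySem.Chars.join_cons_cons, PySem.Chars.join_singleton]
    conv_rhs => rw [← List.takeWhile_append_dropWhile (p := (· != ' ')) (l := log.toList)]
    rw [hd]
    simp
  exact String.toList_inj.mp hlist

-- insertBy walks past a trailing block of all-"before" elements unchanged
theorem insAppend {α : Type} (before : α → α → Bool) (x : α) (as bs : List α)
    (h : ∀ b ∈ bs, before x b = true) :
    PySem.List.insertBy before x (as ++ bs) = PySem.List.insertBy before x as ++ bs := by
  induction as with
  | nil =>
    cases bs with
    | nil => simp [PySem.List.insertBy]
    | cons b bt => simp [PySem.List.insertBy, h b (by simp)]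
  | cons a at' ih =>
    by_cases ha : before x a = true
    · simp [PySem.List.insertBy, ha]
    · simp only [Bool.not_eq_true] at ha
      simp [PySem.List.insertBy, ha, ih]

-- insertBy commutes with map when the comparators correspond
theorem insMap {α β : Type} (before : β → β → Bool) (before' : α → α → Bool)
    (f : α → β) (x : α) (ys : List α)
    (h : ∀ y ∈ ys, before (f x) (f y) = before' x y) :
    PySem.List.insertBy before (f x) (ys.map f) = (PySem.List.insertBy before' x ys).map f := by
  induction ys with
  | nil => simp [PySem.List.insertBy]
  | cons y yt ih =>
    have hy := h y (by simp)
    by_cases hb : before' x y = true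
    · simp [PySem.List.insertBy, hy, hb]
    · simp only [Bool.not_eq_true] at hb
      rw [hb] at hy
      simp [PySem.List.insertBy, hy, hb, ih (fun z hz => h z (by simp [hz]))]

-- proof-side names for B's comparator, A's letter comparator, and A's rebuild
def bB (a b : String) : Bool := @decide _ (keyDec (keyB a) (keyB b))
def lt2 (a b : String × String) : Bool :=
  decide (a.2 < b.2) || (!decide (b.2 < a.2) && decide (a.1 < b.1))
def rebuild (x : String × String) : String := PySem.Str.join " " [x.1, x.2]
def good (pr : String × String) : Prop :=
  keyB (rebuild pr) = (0, pr.2.toList, pr.1.toList)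
def dkey : Nat × List Char × List Char := (1, [], [])

theorem sorted_concat (p : List String) (x : String) :
    @PySem.List.sorted String _ keyLTi (fun a b => keyDec a b) (p ++ [x]) keyB false =
      PySem.List.insertBy bB x
        (@PySem.List.sorted String _ keyLTi (fun a b => keyDec a b) p keyB false) := by
  simp only [PySem.List.sorted, List.foldl_append, List.foldl_cons, List.foldl_nil]
  rfl

theorem sorted2_concat (ls : List (String × String)) (pr : String × String) :
    PySem.List.sorted2 (ls ++ [pr]) (fun x => x.2) (fun x => x.1) =
      PySem.List.insertBy lt2 pr (PySem.List.sorted2 ls (fun x => x.2) (fun x => x.1)) := by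
  simp only [PySem.List.sorted2, List.foldl_append, List.foldl_cons, List.foldl_nil]
  rfl

-- B's comparator on two letter logs is A's (content, identifier) comparator
theorem bB_lt2 (npr pr : String × String) (hk : good npr) (hg : good pr) :
    bB (rebuild npr) (rebuild pr) = lt2 npr pr := by
  simp only [good] at hk hg
  have h1 : keyLt (keyB (rebuild npr)) (keyB (rebuild pr)) ↔
      (npr.2 < pr.2 ∨ (npr.2 = pr.2 ∧ npr.1 < pr.1)) := by
    rw [hk, hg]
    simp [keyLt, String.lt_iff_toList_lt, String.ext_iff]
  simp only [bB, lt2]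
  rw [Bool.eq_iff_iff]
  simp only [decide_eq_true_iff, Bool.or_eq_true, Bool.and_eq_true,
    Bool.not_eq_true', decide_eq_false_iff_not]
  rw [h1]
  rcases lt_trichotomy npr.2 pr.2 with h | h | h
  · simp [h]
  · simp [h]
  · simp [h, lt_asymm h, (ne_of_gt h)]

-- loop invariant: B's running insertion sort equals A's final assembly of the processed prefix
theorem invariant (p : List String)
    (hp : ∀ log ∈ p, 2 ≤ (log.toList.dropWhile (· != ' ')).length) :
    (∀ pr ∈ (p.foldl stepA ([], [])).1, good pr) ∧
    (∀ d ∈ (p.foldl stepA ([], [])).2, keyB d = dkey) ∧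
    @PySem.List.sorted String _ keyLTi (fun a b => keyDec a b) p keyB false =
      (PySem.List.sorted2 (p.foldl stepA ([], [])).1 (fun x => x.2) (fun x => x.1)).map rebuild
        ++ (p.foldl stepA ([], [])).2 := by
  induction p using List.reverseRecOn with
  | nil =>
    refine ⟨by simp, by simp, ?_⟩
    simp [PySem.List.sorted, PySem.List.sorted2]
  | append_singleton p x ih =>
    obtain ⟨hG, hD, hE⟩ := ih (fun log hl => hp log (by simp [hl]))
    have hx := hp x (by simp)
    obtain ⟨hdshape, hdne, hmem⟩ := drop_shape x.toList hx
    have hsplit := splitStr x hmem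
    have hfold : (p ++ [x]).foldl stepA ([], []) = stepA (p.foldl stepA ([], [])) x := by
      rw [List.foldl_append]; rfl
    rcases hdt : (x.toList.dropWhile (· != ' ')).tail with _ | ⟨d0, dl⟩
    · exact absurd hdt hdne
    · rw [hdt] at hsplit
      by_cases hal : PySem.Chars.isalpha d0 = true
      · -- letter log
        have hstep : stepA (p.foldl stepA ([], [])) x =
            ((p.foldl stepA ([], [])).1 ++
              [(String.ofList (x.toList.takeWhile (· != ' ')), String.ofList (d0 :: dl))],
             (p.foldl stepA ([], [])).2) := by
          simp [stepA, hsplit, hal]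
        have hkeyx : keyB x = (0, d0 :: dl, x.toList.takeWhile (· != ' ')) := by
          simp [keyB, hsplit, hal]
        have hre : rebuild (String.ofList (x.toList.takeWhile (· != ' ')),
            String.ofList (d0 :: dl)) = x := by
          have := rebuild_round x hx
          rw [hdt] at this
          exact this
        have hgood : good (String.ofList (x.toList.takeWhile (· != ' ')),
            String.ofList (d0 :: dl)) := by
          simp only [good, hre, hkeyx, String.toList_ofList]
        refine ⟨?_, ?_, ?_⟩
        · rw [hfold, hstep]
          intro pr hpr
          rcases List.mem_append.mp hpr with h | h
          · exact hG pr h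
          · simp at h
            rw [h]
            exact hgood
        · rw [hfold, hstep]
          exact hD
        · rw [hfold, hstep, sorted_concat, hE]
          have hdig : ∀ b ∈ (p.foldl stepA ([], [])).2, bB x b = true := by
            intro b hb
            have hklt : keyLt (keyB x) (keyB b) := by
              rw [hkeyx, hD b hb]
              simp [keyLt, dkey]
            unfold bB
            exact @decide_eq_true _ (keyDec _ _) hklt
          rw [insAppend bB x _ _ hdig]
          conv_lhs => rw [← hre]
          rw [insMap bB lt2 rebuild _ _ (fun pr hpr => bB_lt2 _ pr hgood
            (hG pr ((PySem.List.sorted2_perm _ _ _ _).mem_iff.mp hpr)))]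
          rw [sorted2_concat]
      · -- digit log
        have hstep : stepA (p.foldl stepA ([], [])) x =
            ((p.foldl stepA ([], [])).1, (p.foldl stepA ([], [])).2 ++ [x]) := by
          simp [stepA, hsplit, hal]
        have hkeyx : keyB x = dkey := by
          simp [keyB, hsplit, hal, dkey]
        refine ⟨?_, ?_, ?_⟩
        · rw [hfold, hstep]
          exact hG
        · rw [hfold, hstep]
          intro d hd
          rcases List.mem_append.mp hd with h | h
          · exact hD d h
          · simp at h
            rw [h, hkeyx]
        · rw [hfold, hstep, sorted_concat, hE]
          have hall : ∀ y ∈ (PySem.List.sorted2 (p.foldl stepA ([], [])).1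
              (fun x => x.2) (fun x => x.1)).map rebuild ++ (p.foldl stepA ([], [])).2,
              bB x y = false := by
            intro y hy
            rcases List.mem_append.mp hy with h | h
            · obtain ⟨pr, hpr, hyr⟩ := List.mem_map.mp h
              have hgpr := hG pr ((PySem.List.sorted2_perm _ _ _ _).mem_iff.mp hpr)
              simp only [good] at hgpr
              have hnlt : ¬ keyLt (keyB x) (keyB y) := by
                rw [hkeyx, ← hyr, hgpr]
                simp [keyLt, dkey]
              unfold bB
              exact @decide_eq_false _ (keyDec _ _) hnlt
            · have hnlt : ¬ keyLt (keyB x) (keyB y) := by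
                rw [hkeyx, hD y h]
                simp [keyLt, dkey]
              unfold bB
              exact @decide_eq_false _ (keyDec _ _) hnlt
          rw [PySem.List.insertBy_of_forall_not_before bB x _ hall]
          rw [List.append_assoc]

-- ===== VERDICT (by name: the statement is the Claim_ definition above) =====
theorem sort_logs_spec : Claim_equal_sort_logs := by
  intro in_log _ hpre
  unfold Pre_sort_logs at hpre
  obtain ⟨_, _, hE⟩ := invariant in_log hpre
  unfold Spec_sort_logs sort_logs sort_logs_alt
  exact hE.symm
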